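-- pv_equiv track=rewrite | github.com/FabrizioPe/tiny_python_projects | 21_tictactoe/tictactoe.py | format_board
-- ===== SOURCE A (Python) =====
-- def format_board(board: str) -> str:
--     """Return the board formatted for output"""
--
--     out_board = ''
--     for i in range(0, len(board)):
--         if i == 0 or i % 3 == 0:
--             out_board += '\n' + '-------------' + '\n|'
--         tic = board[i] if board[i] in 'XO' else i + 1
--         out_board += f' {tic} |'
--     out_board += '\n' + '-' * 13
--
--     return out_board.lstrip()
-- ===== SOURCE B (Python) =====
-- def format_board(board: str) -> str:
--     """Return the board formatted for output"""
--     sep = '-' * 13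
--     rows = ['|' + ''.join(f' {c if c in "XO" else i + 1} |'
--                           for i, c in enumerate(board[s:s + 3], s))
--             for s in range(0, len(board), 3)]
--     parts = [sep]
--     for row in rows:
--         parts.append(row)
--         parts.append(sep)
--     return '\n'.join(parts)
-- ===== Notes on version B (the rewrite author's own statement) =====
-- stated objective: simpler
-- what changed: B chunks the board into rows of three and newline-joins separator-interleaved full row lines, replacing A's flat per-character loop with conditional separator insertion, incremental string concatenation and a trailing lstrip.
import Mathlib
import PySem

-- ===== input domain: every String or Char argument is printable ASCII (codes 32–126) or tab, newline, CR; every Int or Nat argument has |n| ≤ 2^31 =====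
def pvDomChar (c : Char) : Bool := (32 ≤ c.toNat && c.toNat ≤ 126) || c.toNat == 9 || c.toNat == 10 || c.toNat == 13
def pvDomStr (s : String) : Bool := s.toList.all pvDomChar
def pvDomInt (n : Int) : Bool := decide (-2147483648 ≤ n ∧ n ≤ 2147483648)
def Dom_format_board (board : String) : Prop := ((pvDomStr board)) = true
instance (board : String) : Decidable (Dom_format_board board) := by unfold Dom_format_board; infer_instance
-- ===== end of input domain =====

-- B replaces A's flat per-character loop (conditional separator insertion plus a trailing
-- lstrip) by row-chunking and '\n'.join of separator-interleaved row lines; objective: simpler.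

-- ===== PORT A =====
-- A's loop body: the conditional separator insertion, then the cell append
def pvAStep (cs : List Char) (out : List Char) (i : Int) : List Char :=
  let out := if i == 0 || PySem.Int.mod i 3 == 0 then
      out ++ ('\n' :: "-------------".toList) ++ ['\n', '|'] else out
  let bi := PySem.List.pyGetD cs i ' '   -- board[i]; i is always in range here
  let tic : List Char :=
    if PySem.Chars.isIn [bi] ['X', 'O'] then [bi] else PySem.Int.toChars (i + 1)
  out ++ (' ' :: tic) ++ [' ', '|']

-- literal transliteration of A's flat loop over range(0, len(board))
def format_board (board : String) : String :=
  let cs := board.toList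
  let out : List Char := (PySem.List.pyRange 0 (cs.length : Int)).foldl (pvAStep cs) []
  String.ofList (PySem.Chars.lstrip (out ++ '\n' :: List.replicate 13 '-'))

-- ===== PORT B =====
def pvSep : List Char := List.replicate 13 '-'

-- one cell ' c |' of a row line, labelling a blank with its global index + 1
def pvCell (i : Nat) (c : Char) : List Char :=
  ' ' :: (if PySem.Chars.isIn [c] ['X', 'O'] then [c] else PySem.Int.toChars ((i : Int) + 1)) ++ [' ', '|']

-- the ''.join of the cell comprehension over enumerate(chunk, s)
def pvCells : List Char → Nat → List Char
  | [], _ => []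
  | c :: rest, i => pvCell i c ++ pvCells rest (i + 1)

-- the row-line comprehension over range(0, len(board), 3): chunks of ≤ 3 characters
def pvRows : List Char → Nat → List (List Char)
  | [], _ => []
  | c :: rest, s => ('|' :: pvCells ((c :: rest).take 3) s) :: pvRows (rest.drop 2) (s + 3)
  termination_by cs _ => cs.length
  decreasing_by simp

def format_board_alt (board : String) : String :=
  let rows := pvRows board.toList 0
  let parts := rows.foldl (fun ps r => ps ++ [r, pvSep]) [pvSep]
  String.ofList (PySem.Chars.join ['\n'] parts)

-- ===== PRECONDITION & SPEC =====
def Spec_format_board (board : String) (out : String) : Prop := out = format_board_alt board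
instance (board : String) (out : String) : Decidable (Spec_format_board board out) := by unfold Spec_format_board; infer_instance

-- ===== CLAIM (what is proved, stated in full; the proofs are below) =====
def Claim_equal_format_board : Prop := ∀ (board : String), Dom_format_board board → Spec_format_board board (format_board board)

-- ===== LEMMAS AND PROOFS =====

-- A's per-character loop body, as a structural recursion over the suffix of the board
-- starting at global index i (proof-side characterisation of A's fold)
def pvAChunk : List Char → Nat → List Char
  | [], _ => []
  | c :: rest, i =>
      (if i % 3 = 0 then '\n' :: pvSep ++ ['\n', '|'] else []) ++ pvCell i c ++ pvAChunk rest (i + 1)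

lemma pvA_foldl (full : List Char) :
    ∀ (k : Nat) (s : Nat) (out : List Char), full.length ≤ s + k →
    (PySem.List.pyRange (s : Int) (full.length : Int)).foldl (pvAStep full) out
    = out ++ pvAChunk (full.drop s) s := by
  intro k
  induction k with
  | zero =>
      intro s out hs
      have hdrop : full.drop s = [] := List.drop_eq_nil_of_le (by omega)
      have hr : PySem.List.pyRange (s : Int) (full.length : Int) = [] := by
        simp [PySem.List.pyRange]; omega
      rw [hr, hdrop]; simp [pvAChunk]
  | succ k ih =>
      intro s out hs
      by_cases hlt : s < full.length
      · have hlt' : (s : Int) < (full.length : Int) := by exact_mod_cast hlt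
        rw [PySem.List.pyRange_one_cons hlt', List.foldl_cons]
        have hs1 : ((s : Int) + 1) = ((s + 1 : Nat) : Int) := by push_cast; ring
        rw [hs1, ih (s + 1) _ (by omega), List.drop_eq_getElem_cons hlt]
        have hget : PySem.List.pyGetD full (s : Int) ' ' = full[s] := by
          simp [PySem.List.pyGetD_natCast, hlt]
        simp only [pvAStep, pvAChunk, pvCell, hget]
        by_cases h3 : s % 3 = 0
        · have hdvd : (3 : Int) ∣ (s : Int) := by
            exact_mod_cast Nat.dvd_of_mod_eq_zero h3
          simp [h3, hdvd, pvSep, List.append_assoc]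
        · have hs0 : s ≠ 0 := by omega
          have hdvd : ¬ (3 : Int) ∣ (s : Int) := by omega
          simp [h3, hs0, hdvd, List.append_assoc]
      · have hdrop : full.drop s = [] := List.drop_eq_nil_of_le (by omega)
        have hr : PySem.List.pyRange (s : Int) (full.length : Int) = [] := by
          simp [PySem.List.pyRange]; omega
        rw [hr, hdrop]; simp [pvAChunk]

-- the parts-building loop of B is an interleaving flatMap
lemma pvParts (rows : List (List Char)) :
    rows.foldl (fun ps r => ps ++ [r, pvSep]) [pvSep]
      = [pvSep] ++ rows.flatMap (fun r => [r, pvSep]) :=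
  PySem.List.foldl_append_eq_flatMap _ rows [pvSep]

-- A's loop output plus its trailing newline+separator equals a newline followed by B's join
lemma pvKey : ∀ (n : Nat) (cs : List Char) (s : Nat), cs.length ≤ n → s % 3 = 0 →
    pvAChunk cs s ++ '\n' :: pvSep
      = '\n' :: PySem.Chars.join ['\n'] ([pvSep] ++ (pvRows cs s).flatMap (fun r => [r, pvSep])) := by
  intro n
  induction n with
  | zero =>
      intro cs s hn _
      have : cs = [] := List.length_eq_zero_iff.mp (by omega)
      subst this
      simp [pvAChunk, pvRows, PySem.Chars.join_singleton]
  | succ n ih =>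
      intro cs s hn h3
      match cs with
      | [] => simp [pvAChunk, pvRows, PySem.Chars.join_singleton]
      | [c] =>
          rw [pvRows]
          simp only [List.take, List.drop, pvRows, List.flatMap_cons, List.flatMap_nil]
          rw [show ([pvSep] ++ (['|' :: pvCells [c] s, pvSep] ++ []))
              = pvSep :: ('|' :: pvCells [c] s) :: [pvSep] from by simp]
          rw [PySem.Chars.join_cons_cons, PySem.Chars.join_cons_cons, PySem.Chars.join_singleton]
          simp [pvAChunk, pvCells, h3, List.append_assoc]
      | [c, d] =>
          rw [pvRows]
          simp only [List.take, List.drop, pvRows, List.flatMap_cons, List.flatMap_nil]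
          rw [show ([pvSep] ++ (['|' :: pvCells [c, d] s, pvSep] ++ []))
              = pvSep :: ('|' :: pvCells [c, d] s) :: [pvSep] from by simp]
          rw [PySem.Chars.join_cons_cons, PySem.Chars.join_cons_cons, PySem.Chars.join_singleton]
          have h1 : ¬ (s + 1) % 3 = 0 := by omega
          simp [pvAChunk, pvCells, h3, h1, List.append_assoc]
      | c :: d :: e :: rest =>
          rw [pvRows]
          simp only [List.take, List.drop, List.flatMap_cons]
          have hrec := ih rest (s + 3) (by simp only [List.length_cons] at hn; omega) (by omega)
          rw [show ([pvSep] ++ (['|' :: pvCells [c, d, e] s, pvSep]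
                ++ (pvRows rest (s + 3)).flatMap (fun r => [r, pvSep])))
              = pvSep :: ('|' :: pvCells [c, d, e] s)
                :: ([pvSep] ++ (pvRows rest (s + 3)).flatMap (fun r => [r, pvSep])) from by simp]
          rw [PySem.Chars.join_cons_cons]
          rw [show (('|' :: pvCells [c, d, e] s)
                :: ([pvSep] ++ (pvRows rest (s + 3)).flatMap (fun r => [r, pvSep])))
              = ('|' :: pvCells [c, d, e] s)
                :: pvSep :: ((pvRows rest (s + 3)).flatMap (fun r => [r, pvSep])) from by simp]
          rw [PySem.Chars.join_cons_cons]
          have h1 : ¬ (s + 1) % 3 = 0 := by omega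
          have h2 : ¬ (s + 2) % 3 = 0 := by omega
          simp only [pvAChunk, pvCells, h3, h1, h2,
            List.append_assoc, List.nil_append, List.cons_append]
          rw [show s + 1 + 1 + 1 = s + 3 from by ring] at *
          simp only [← List.append_assoc] at hrec ⊢
          simp [hrec, List.append_assoc]

-- B's joined string begins with a dash
lemma pvJoin_head (l : List (List Char)) :
    ∃ t, PySem.Chars.join ['\n'] (pvSep :: l) = '-' :: t := by
  cases l with
  | nil => exact ⟨List.replicate 12 '-', by rw [PySem.Chars.join_singleton]; rfl⟩
  | cons r rest =>
      refine ⟨List.replicate 12 '-' ++ ['\n'] ++ PySem.Chars.join ['\n'] (r :: rest), ?_⟩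
      rw [PySem.Chars.join_cons_cons]; rfl

-- ===== VERDICT (by name: the statement is the Claim_ definition above) =====
theorem format_board_spec : Claim_equal_format_board := by
  unfold Claim_equal_format_board
  intro board _
  unfold Spec_format_board
  simp only [format_board, format_board_alt]
  have ha := pvA_foldl board.toList board.toList.length 0 [] (by omega)
  simp only [Nat.cast_zero, List.nil_append, List.drop_zero] at ha
  rw [ha]
  have hkey := pvKey board.toList.length board.toList 0 (le_refl _) (by norm_num)
  rw [pvParts]
  have hsep : ('\n' :: List.replicate 13 '-' : List Char) = '\n' :: pvSep := rfl
  rw [hsep, hkey]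
  obtain ⟨t, ht⟩ := pvJoin_head ((pvRows board.toList 0).flatMap (fun r => [r, pvSep]))
  have : ([pvSep] ++ (pvRows board.toList 0).flatMap (fun r => [r, pvSep]))
      = pvSep :: (pvRows board.toList 0).flatMap (fun r => [r, pvSep]) := by simp
  rw [this, ht]
  have hnl : PySem.Chars.isspace '\n' = true := by decide
  have hdash : PySem.Chars.isspace '-' = false := by decide
  simp [PySem.Chars.lstrip, List.dropWhile, hnl, hdash]
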